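-- pv_equiv track=rewrite | github.com/kingddd04/Python_Scripts | Phython Scripts/My Pythons Scripts/#45 Matrix_Advanced_Processing.py | Conta_Rettangoli
-- ===== SOURCE A (Python) =====
-- def Trova_Base_E_Altezza(Matrice,y,x):
--     pix = Matrice[y][x]
--     y_swich = True
--     counter = 0
--     h = 0
--     while y_swich == True:
--         if Matrice[y+counter][x] == pix:
--             counter +=1
--         if y+counter == len(Matrice) or Matrice[y+counter][x] != pix:
--             y_swich = False
--             h = counter
--     x_swich = True
--     counter = 0
--     b = 0
--     while x_swich == True:
--         if Matrice[y][x+counter] == pix: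
--             counter +=1
--         if x+counter == len(Matrice[0]) or Matrice[y][x+counter] != pix:
--             x_swich = False
--             b = counter
--     Dati_Rettangolo = " Coordinate y : "+str(y)+ " , Coordinate x : "+str(x)+ " , Base : " + str(b) + " , Altezza : " + str(h) + " , Colore : " + str(pix)
--     return Dati_Rettangolo
--
-- def Conta_Rettangoli(Matrice):
--     black = (0,0,0)
--     Rettangoli_Res = []
--     for y in range(len(Matrice)-1):
--         for x in range(len(Matrice[0])-1):
--             pix = Matrice[y][x]
--             if x == 0 and y == 0:
--                 if pix != black:
--                     if pix == Matrice[y+1][x] and pix == Matrice[y][x+1]: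
--                         stringa_result = Trova_Base_E_Altezza(Matrice, y, x)
--                         Rettangoli_Res.append(stringa_result)
--             elif y != 0 and x == 0:
--                 if pix != black:
--                     if pix == Matrice[y+1][x] and Matrice[y-1][x] != pix :
--                         stringa_result = Trova_Base_E_Altezza(Matrice, y, x)
--                         Rettangoli_Res.append(stringa_result)
--             elif y == 0 and x != 0:
--                 if pix != black:
--                     if pix == Matrice[y][x+1] and Matrice[y][x-1] != pix :
--                         stringa_result = Trova_Base_E_Altezza(Matrice, y, x)
--                         Rettangoli_Res.append(stringa_result)
--
--             elif y != 0 and x != 0: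
--                 if pix != black:
--                     if pix == Matrice[y+1][x] and pix == Matrice[y][x+1]:
--                         if pix != Matrice[y-1][x] and pix != Matrice[y][x-1]:
--                             stringa_result = Trova_Base_E_Altezza(Matrice, y, x)
--                             Rettangoli_Res.append(stringa_result)
--     return Rettangoli_Res
-- ===== SOURCE B (Python) =====
-- def Conta_Rettangoli(Matrice):
--     # Alternative algorithm: precompute right/down run-length tables once, O(1) per corner lookup.
--     black = (0, 0, 0)
--     h = len(Matrice)
--     if h < 2:
--         return []
--     w = len(Matrice[0])
--
--     def _runs(cells):
--         # out[i] = length of the maximal run of cells[i] starting at i (backward scan)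
--         out = [1] * len(cells)
--         for i in range(len(cells) - 2, -1, -1):
--             out[i] = out[i + 1] + 1 if cells[i] == cells[i + 1] else 1
--         return out
--
--     right = [_runs(row[:w]) for row in Matrice]
--     down = [_runs([row[x] for row in Matrice]) for x in range(w)]  # down[x][y]
--
--     res = []
--     for y in range(h - 1):
--         for x in range(w - 1):
--             pix = Matrice[y][x]
--             if (pix != black
--                     and ((y == 0 and x != 0) or Matrice[y + 1][x] == pix)
--                     and ((y != 0 and x == 0) or Matrice[y][x + 1] == pix)
--                     and (y == 0 or Matrice[y - 1][x] != pix)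
--                     and (x == 0 or Matrice[y][x - 1] != pix)):
--                 res.append(" Coordinate y : " + str(y) + " , Coordinate x : " + str(x)
--                            + " , Base : " + str(right[y][x]) + " , Altezza : " + str(down[x][y])
--                            + " , Colore : " + str(pix))
--     return res
-- ===== Notes on version B (the rewrite author's own statement) =====
-- stated objective: alternative
-- what changed: Replaces the per-corner while-loop scans (re-walking the row and column at every detected corner) and the four-way positional case chain with right/down run-length tables computed once in a backward pass plus one unified corner condition; O(W*H) always instead of O(W*H*(W+H)) worst case, though not measurably faster on typical sparse-corner inputs.
-- outside the precondition, e.g. on Conta_Rettangoli([[(1, 1, 1)], []]): A returns [], B raises IndexError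
import Mathlib
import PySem

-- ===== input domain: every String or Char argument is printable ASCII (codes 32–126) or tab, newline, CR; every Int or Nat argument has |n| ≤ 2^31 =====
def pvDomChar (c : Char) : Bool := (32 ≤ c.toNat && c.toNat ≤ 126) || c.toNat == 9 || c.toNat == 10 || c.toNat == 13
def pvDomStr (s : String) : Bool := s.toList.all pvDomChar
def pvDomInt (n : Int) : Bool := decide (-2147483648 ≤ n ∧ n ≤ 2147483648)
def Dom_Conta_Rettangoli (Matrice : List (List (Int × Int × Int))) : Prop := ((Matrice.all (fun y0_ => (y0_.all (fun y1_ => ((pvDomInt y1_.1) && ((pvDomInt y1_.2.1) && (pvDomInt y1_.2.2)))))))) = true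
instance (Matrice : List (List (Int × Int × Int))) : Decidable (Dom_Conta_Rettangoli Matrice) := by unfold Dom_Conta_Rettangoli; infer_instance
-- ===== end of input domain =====

-- B replaces A's per-corner while-loop rescans by run-length tables computed once (a different algorithm of similar typical cost); return value only, no mutation.

-- ===== PORT A =====
-- Matrice[y][x]: inside Pre_ every access is in range, so List.getD is exact there.
def pvGetC (M : List (List (Int × Int × Int))) (y x : Nat) : Int × Int × Int :=
  (M.getD y []).getD x (0, 0, 0)

-- str((a,b,c)) for an int triple
def pvStrTriple (p : Int × Int × Int) : String :=
  "(" ++ PySem.Int.toStr p.1 ++ ", " ++ PySem.Int.toStr p.2.1 ++ ", " ++ PySem.Int.toStr p.2.2 ++ ")"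

-- A's first while loop (y direction); fuel only makes the loop total, it is never exhausted inside Pre_.
def pvVloop (M : List (List (Int × Int × Int))) (x : Nat) (pix : Int × Int × Int) :
    Nat → Nat → Nat → Nat
  | 0, _, counter => counter
  | fuel + 1, y, counter =>
    let c := if pvGetC M (y + counter) x = pix then counter + 1 else counter
    if y + c = M.length ∨ pvGetC M (y + c) x ≠ pix then c
    else pvVloop M x pix fuel y c

-- A's second while loop (x direction)
def pvHloop (M : List (List (Int × Int × Int))) (y : Nat) (pix : Int × Int × Int) :
    Nat → Nat → Nat → Nat
  | 0, _, counter => counter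
  | fuel + 1, x, counter =>
    let c := if pvGetC M y (x + counter) = pix then counter + 1 else counter
    if x + c = (M.headD []).length ∨ pvGetC M y (x + c) ≠ pix then c
    else pvHloop M y pix fuel x c

def pvTrova (M : List (List (Int × Int × Int))) (y x : Nat) : String :=
  let pix := pvGetC M y x
  let h := pvVloop M x pix (M.length + 1) y 0
  let b := pvHloop M y pix ((M.headD []).length + 1) x 0
  " Coordinate y : " ++ PySem.Int.toStr (y : Int) ++ " , Coordinate x : " ++ PySem.Int.toStr (x : Int)
    ++ " , Base : " ++ PySem.Int.toStr (b : Int) ++ " , Altezza : " ++ PySem.Int.toStr (h : Int)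
    ++ " , Colore : " ++ pvStrTriple pix

def Conta_Rettangoli (Matrice : List (List (Int × Int × Int))) : List String :=
  (List.range (Matrice.length - 1)).foldl (fun acc y =>
    (List.range ((Matrice.headD []).length - 1)).foldl (fun acc x =>
      let pix := pvGetC Matrice y x
      if x = 0 ∧ y = 0 then
        if pix ≠ (0, 0, 0) then
          if pix = pvGetC Matrice (y + 1) x ∧ pix = pvGetC Matrice y (x + 1) then
            acc ++ [pvTrova Matrice y x] else acc
        else acc
      else if y ≠ 0 ∧ x = 0 then
        if pix ≠ (0, 0, 0) then
          if pix = pvGetC Matrice (y + 1) x ∧ pvGetC Matrice (y - 1) x ≠ pix then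
            acc ++ [pvTrova Matrice y x] else acc
        else acc
      else if y = 0 ∧ x ≠ 0 then
        if pix ≠ (0, 0, 0) then
          if pix = pvGetC Matrice y (x + 1) ∧ pvGetC Matrice y (x - 1) ≠ pix then
            acc ++ [pvTrova Matrice y x] else acc
        else acc
      else if y ≠ 0 ∧ x ≠ 0 then
        if pix ≠ (0, 0, 0) then
          if pix = pvGetC Matrice (y + 1) x ∧ pix = pvGetC Matrice y (x + 1) then
            if pix ≠ pvGetC Matrice (y - 1) x ∧ pix ≠ pvGetC Matrice y (x - 1) then
              acc ++ [pvTrova Matrice y x] else acc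
          else acc
        else acc
      else acc) acc) []

-- ===== PORT B =====
-- _runs: out[i] = out[i+1]+1 if cells[i]==cells[i+1] else 1 (backward scan), as structural recursion.
def pvRuns : List (Int × Int × Int) → List Nat
  | [] => []
  | [_] => [1]
  | a :: b :: t => (if a = b then (pvRuns (b :: t)).headD 0 + 1 else 1) :: pvRuns (b :: t)

def Conta_Rettangoli_alt (Matrice : List (List (Int × Int × Int))) : List String :=
  if Matrice.length < 2 then [] else
  let w := (Matrice.headD []).length
  let right := Matrice.map (fun row => pvRuns (row.take w))
  let down := (List.range w).map (fun x => pvRuns (Matrice.map (fun row => row.getD x (0, 0, 0))))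
  (List.range (Matrice.length - 1)).foldl (fun acc y =>
    (List.range (w - 1)).foldl (fun acc x =>
      let pix := pvGetC Matrice y x
      if pix ≠ (0, 0, 0) ∧ ((y = 0 ∧ x ≠ 0) ∨ pvGetC Matrice (y + 1) x = pix)
          ∧ ((y ≠ 0 ∧ x = 0) ∨ pvGetC Matrice y (x + 1) = pix)
          ∧ (y = 0 ∨ pvGetC Matrice (y - 1) x ≠ pix)
          ∧ (x = 0 ∨ pvGetC Matrice y (x - 1) ≠ pix) then
        acc ++ [" Coordinate y : " ++ PySem.Int.toStr (y : Int) ++ " , Coordinate x : " ++ PySem.Int.toStr (x : Int)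
          ++ " , Base : " ++ PySem.Int.toStr (((right.getD y []).getD x 0 : Nat) : Int)
          ++ " , Altezza : " ++ PySem.Int.toStr (((down.getD x []).getD y 0 : Nat) : Int)
          ++ " , Colore : " ++ pvStrTriple pix]
      else acc) acc) []

-- ===== PRECONDITION & SPEC =====
-- Pre_ excludes ragged matrices having a row shorter than the first row: on those A in general
-- raises IndexError (where it happens to return, the value hinges on the accidental row lengths
-- and B raises there instead).
def Pre_Conta_Rettangoli (Matrice : List (List (Int × Int × Int))) : Prop :=
  ∀ row ∈ Matrice, (Matrice.headD []).length ≤ row.length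
instance (Matrice : List (List (Int × Int × Int))) : Decidable (Pre_Conta_Rettangoli Matrice) := by
  unfold Pre_Conta_Rettangoli; infer_instance

def pvWitness_Conta_Rettangoli : (List (List (Int × Int × Int))) :=
  [[(200, 30, 30), (200, 30, 30), (0, 0, 0), (9, 9, 9)],
   [(200, 30, 30), (200, 30, 30), (0, 0, 0), (9, 9, 9)],
   [(0, 0, 0), (0, 0, 0), (40, 80, 120), (40, 80, 120)],
   [(7, 7, 7), (0, 0, 0), (40, 80, 120), (40, 80, 120)]]

def Spec_Conta_Rettangoli (Matrice : List (List (Int × Int × Int))) (out : List String) : Prop := out = Conta_Rettangoli_alt Matrice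
instance (Matrice : List (List (Int × Int × Int))) (out : List String) : Decidable (Spec_Conta_Rettangoli Matrice out) := by unfold Spec_Conta_Rettangoli; infer_instance

-- ===== CLAIM (what is proved, stated in full; the proofs are below) =====
def Claim_equal_Conta_Rettangoli : Prop := ∀ (Matrice : List (List (Int × Int × Int))), Dom_Conta_Rettangoli Matrice → Pre_Conta_Rettangoli Matrice → Spec_Conta_Rettangoli Matrice (Conta_Rettangoli Matrice)

-- ===== LEMMAS AND PROOFS =====

theorem pvRuns_length (l : List (Int × Int × Int)) : (pvRuns l).length = l.length := by
  induction l using pvRuns.induct <;> simp [pvRuns, *]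

theorem pv_getD_map {α β : Type} (l : List α) (f : α → β) (i : Nat) (d : β) (d' : α)
    (h : i < l.length) : (l.map f).getD i d = f (l.getD i d') := by
  simp [List.getD_eq_getElem?_getD, List.getElem?_map, List.getElem?_eq_getElem, h]

theorem pvRuns_getD (l : List (Int × Int × Int)) (i : Nat) (hi : i < l.length) :
    (pvRuns l).getD i 0 =
      if i + 1 < l.length ∧ l.getD (i + 1) (0,0,0) = l.getD i (0,0,0) then
        (pvRuns l).getD (i + 1) 0 + 1
      else 1 := by
  induction l using pvRuns.induct generalizing i with
  | case1 => simp at hi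
  | case2 a =>
    cases i with
    | zero => simp [pvRuns]
    | succ j => simp at hi
  | case3 a b t ih =>
    cases i with
    | zero =>
      have hlen : (pvRuns (b :: t)).length = (b :: t).length := pvRuns_length _
      by_cases hab : a = b
      · obtain ⟨r, rs, hr⟩ : ∃ r rs, pvRuns (b :: t) = r :: rs := by
          cases h : pvRuns (b :: t) with
          | nil => rw [h] at hlen; simp at hlen
          | cons r rs => exact ⟨r, rs, rfl⟩
        simp [pvRuns, hab, hr]
      · simp only [pvRuns, hab, if_false, List.getD_cons_zero, List.getD_cons_succ]
        rw [if_neg]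
        intro h
        exact hab h.2.symm
    | succ j =>
      have hj : j < (b :: t).length := by simpa using hi
      have := ih j hj
      simpa [pvRuns] using this
  
theorem pvFoldl_congr_mem {α β : Type} (l : List α) (f g : β → α → β) (a : β)
    (h : ∀ b x, x ∈ l → f b x = g b x) : l.foldl f a = l.foldl g a := by
  induction l generalizing a with
  | nil => rfl
  | cons x t ih =>
    simp only [List.foldl_cons]
    rw [h a x (by simp)]
    exact ih _ fun b z hz => h b z (List.mem_cons_of_mem _ hz)

theorem pvVloop_eq (M : List (List (Int × Int × Int))) (x : Nat) (pix : Int × Int × Int)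
    (fuel y counter : Nat) (hlt : y + counter < M.length)
    (hpix : pvGetC M (y + counter) x = pix)
    (hfuel : M.length - (y + counter) ≤ fuel) :
    pvVloop M x pix fuel y counter =
      counter + (pvRuns (M.map (fun row => row.getD x (0, 0, 0)))).getD (y + counter) 0 := by
  induction fuel generalizing counter with
  | zero => omega
  | succ fuel ih =>
    have hcol : ∀ i, i < M.length →
        (M.map (fun row => row.getD x (0, 0, 0))).getD i (0,0,0) = pvGetC M i x := by
      intro i hi
      exact pv_getD_map M _ i (0,0,0) [] hi
    have hlen : (M.map (fun row => row.getD x (0, 0, 0))).length = M.length := by simp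
    have hrun := pvRuns_getD (M.map (fun row => row.getD x (0, 0, 0))) (y + counter) (by omega)
    rw [hlen] at hrun
    simp only [pvVloop, hpix]
    rw [if_pos trivial]
    by_cases hstop : y + (counter + 1) = M.length ∨ pvGetC M (y + (counter + 1)) x ≠ pix
    · rw [if_pos (by simpa using hstop)]
      have hcond : ¬ (y + counter + 1 < M.length ∧
          (M.map (fun row => row.getD x (0, 0, 0))).getD (y + counter + 1) (0,0,0)
            = (M.map (fun row => row.getD x (0, 0, 0))).getD (y + counter) (0,0,0)) := by
        rcases hstop with h1 | h2
        · intro ⟨hc, _⟩; omega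
        · intro ⟨hc, he⟩
          rw [hcol _ hc, hcol _ (by omega), hpix] at he
          exact h2 he
      rw [hrun, if_neg hcond]
    · push_neg at hstop
      obtain ⟨hne, heq⟩ := hstop
      rw [if_neg (by simp only [not_or, not_not]; exact ⟨hne, heq⟩)]
      have hlt' : y + (counter + 1) < M.length := by omega
      have := ih (counter + 1) hlt' heq (by omega)
      have hidx : y + (counter + 1) = y + counter + 1 := by omega
      rw [hidx] at this
      rw [this]
      have hcond : y + counter + 1 < M.length ∧
          (M.map (fun row => row.getD x (0, 0, 0))).getD (y + counter + 1) (0,0,0)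
            = (M.map (fun row => row.getD x (0, 0, 0))).getD (y + counter) (0,0,0) := by
        refine ⟨by omega, ?_⟩
        rw [hcol _ (by omega), hcol _ (by omega), hpix]
        simpa using heq
      rw [hrun, if_pos hcond]
      omega

theorem pvTake_getD (l : List (Int × Int × Int)) (w j : Nat) (hj : j < w) :
    (l.take w).getD j (0,0,0) = l.getD j (0,0,0) := by
  simp [List.getD_eq_getElem?_getD, List.getElem?_take, hj]

theorem pvHloop_eq (M : List (List (Int × Int × Int))) (y : Nat) (pix : Int × Int × Int)
    (hw : (M.headD []).length ≤ (M.getD y []).length)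
    (fuel x counter : Nat) (hlt : x + counter < (M.headD []).length)
    (hpix : pvGetC M y (x + counter) = pix)
    (hfuel : (M.headD []).length - (x + counter) ≤ fuel) :
    pvHloop M y pix fuel x counter =
      counter + (pvRuns ((M.getD y []).take (M.headD []).length)).getD (x + counter) 0 := by
  induction fuel generalizing counter with
  | zero => omega
  | succ fuel ih =>
    have hlen : ((M.getD y []).take (M.headD []).length).length = (M.headD []).length := by
      rw [List.length_take]; omega
    have hcol : ∀ i, i < (M.headD []).length →
        ((M.getD y []).take (M.headD []).length).getD i (0,0,0) = pvGetC M y i := by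
      intro i hi
      rw [pvTake_getD _ _ _ hi]; rfl
    have hrun := pvRuns_getD ((M.getD y []).take (M.headD []).length) (x + counter)
      (by rw [hlen]; omega)
    rw [hlen] at hrun
    simp only [pvHloop, hpix]
    rw [if_pos trivial]
    by_cases hstop : x + (counter + 1) = (M.headD []).length ∨ pvGetC M y (x + (counter + 1)) ≠ pix
    · rw [if_pos (by simpa using hstop)]
      have hcond : ¬ (x + counter + 1 < (M.headD []).length ∧
          ((M.getD y []).take (M.headD []).length).getD (x + counter + 1) (0,0,0)
            = ((M.getD y []).take (M.headD []).length).getD (x + counter) (0,0,0)) := by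
        rcases hstop with h1 | h2
        · intro ⟨hc, _⟩; omega
        · intro ⟨hc, he⟩
          rw [hcol _ hc, hcol _ (by omega), hpix] at he
          exact h2 he
      rw [hrun, if_neg hcond]
    · push_neg at hstop
      obtain ⟨hne, heq⟩ := hstop
      rw [if_neg (by simp only [not_or, not_not]; exact ⟨hne, heq⟩)]
      have hlt' : x + (counter + 1) < (M.headD []).length := by omega
      have := ih (counter + 1) hlt' heq (by omega)
      have hidx : x + (counter + 1) = x + counter + 1 := by omega
      rw [hidx] at this
      rw [this]
      have hcond : x + counter + 1 < (M.headD []).length ∧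
          ((M.getD y []).take (M.headD []).length).getD (x + counter + 1) (0,0,0)
            = ((M.getD y []).take (M.headD []).length).getD (x + counter) (0,0,0) := by
        refine ⟨by omega, ?_⟩
        rw [hcol _ (by omega), hcol _ (by omega), hpix]
        simpa using heq
      rw [hrun, if_pos hcond]
      omega

-- A's Trova string equals B's table-lookup string at any in-range corner candidate.
theorem pvTrova_eq (M : List (List (Int × Int × Int))) (y x : Nat)
    (hpre : Pre_Conta_Rettangoli M)
    (hy : y < M.length - 1) (hx : x < (M.headD []).length - 1) :
    pvTrova M y x =
      " Coordinate y : " ++ PySem.Int.toStr (y : Int) ++ " , Coordinate x : " ++ PySem.Int.toStr (x : Int)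
      ++ " , Base : " ++ PySem.Int.toStr ((((M.map (fun row => pvRuns (row.take (M.headD []).length))).getD y []).getD x 0 : Nat) : Int)
      ++ " , Altezza : " ++ PySem.Int.toStr (((((List.range (M.headD []).length).map (fun x => pvRuns (M.map (fun row => row.getD x (0, 0, 0))))).getD x []).getD y 0 : Nat) : Int)
      ++ " , Colore : " ++ pvStrTriple (pvGetC M y x) := by
  have hylen : y < M.length := by omega
  have hxlen : x < (M.headD []).length := by omega
  have hw : (M.headD []).length ≤ (M.getD y []).length := by
    apply hpre
    rw [List.getD_eq_getElem?_getD, List.getElem?_eq_getElem hylen]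
    exact List.getElem_mem _
  have hv := pvVloop_eq M x (pvGetC M y x) (M.length + 1) y 0 (by omega) (by rfl) (by omega)
  have hh := pvHloop_eq M y (pvGetC M y x) hw ((M.headD []).length + 1) x 0 (by omega) (by rfl)
    (by omega)
  have hdown : ((List.range (M.headD []).length).map
      (fun x => pvRuns (M.map (fun row => row.getD x (0, 0, 0))))).getD x []
      = pvRuns (M.map (fun row => row.getD x (0, 0, 0))) := by
    rw [pv_getD_map (List.range (M.headD []).length) _ x [] 0 (by simpa using hxlen)]
    rw [List.getD_eq_getElem?_getD, List.getElem?_range hxlen]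
    rfl
  have hright : (M.map (fun row => pvRuns (row.take (M.headD []).length))).getD y []
      = pvRuns ((M.getD y []).take (M.headD []).length) :=
    pv_getD_map M _ y [] [] hylen
  simp only [Nat.add_zero, Nat.zero_add] at hv hh
  simp only [pvTrova]
  rw [hdown, hright, hv, hh]

-- ===== VERDICT (by name: the statement is the Claim_ definition above) =====

-- A's positional case chain equals B's unified corner condition (pointwise, on abstract atoms).
set_option maxHeartbeats 2000000 in
theorem pvCell (y x : Nat) (pix dn rt up lf : Int × Int × Int) (s : String) (acc : List String) :
    (if x = 0 ∧ y = 0 then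
       if pix ≠ (0, 0, 0) then (if pix = dn ∧ pix = rt then acc ++ [s] else acc) else acc
     else if y ≠ 0 ∧ x = 0 then
       if pix ≠ (0, 0, 0) then (if pix = dn ∧ up ≠ pix then acc ++ [s] else acc) else acc
     else if y = 0 ∧ x ≠ 0 then
       if pix ≠ (0, 0, 0) then (if pix = rt ∧ lf ≠ pix then acc ++ [s] else acc) else acc
     else if y ≠ 0 ∧ x ≠ 0 then
       if pix ≠ (0, 0, 0) then
         (if pix = dn ∧ pix = rt then (if pix ≠ up ∧ pix ≠ lf then acc ++ [s] else acc) else acc)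
       else acc
     else acc)
    =
    (if pix ≠ (0, 0, 0) ∧ ((y = 0 ∧ x ≠ 0) ∨ dn = pix) ∧ ((y ≠ 0 ∧ x = 0) ∨ rt = pix)
        ∧ (y = 0 ∨ up ≠ pix) ∧ (x = 0 ∨ lf ≠ pix) then acc ++ [s] else acc) := by
  by_cases hy0 : y = 0 <;> by_cases hx0 : x = 0 <;>
    by_cases hb : pix = (0, 0, 0) <;>
    by_cases hd : pix = dn <;>
    by_cases hr : pix = rt <;>
    by_cases hu : pix = up <;>
    by_cases hl : pix = lf <;>
    simp [hy0, hx0, hb, hd, hr, hu, hl, eq_comm] <;> split_ifs <;> tauto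

theorem Conta_Rettangoli_spec : Claim_equal_Conta_Rettangoli := by
  unfold Claim_equal_Conta_Rettangoli
  intro M _ hpre
  unfold Spec_Conta_Rettangoli Conta_Rettangoli Conta_Rettangoli_alt
  by_cases hlen : M.length < 2
  · have : M.length - 1 = 0 := by omega
    rw [if_pos hlen, this]
    simp
  · rw [if_neg hlen]
    apply pvFoldl_congr_mem
    intro acc y hyme
    have hy : y < M.length - 1 := by simpa using hyme
    apply pvFoldl_congr_mem
    intro acc x hxme
    have hx : x < (M.headD []).length - 1 := by simpa using hxme
    have htr := pvTrova_eq M y x hpre hy hx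
    show (if x = 0 ∧ y = 0 then _ else _) = _
    rw [htr]
    exact pvCell y x _ _ _ _ _ _ acc
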